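-- pv_equiv track=rewrite | github.com/Faoxis/PythonBasicAndApplication | 1.1.py | searchChildren
-- ===== SOURCE A (Python) =====
-- def searchChildren(classes, parent, child):
--
--     if parent == child:
--         return 0
--
--     if len(classes[parent]) == 0:
--         return 0
--
--     if child in classes[parent]: # тут unhashable type: 'list'
--         return 1
--
--     for grandparent in classes[parent]:
--         return 1 * searchChildren(classes, grandparent, child)
--     return 1
-- ===== SOURCE B (Python) =====
-- def _terminal(classes, parent, child):
--     # Follow first-parent links until a terminal class: equal to child,
--     # with no parents, or with child among its direct parents.
--     p = parent
--     while not (p == child or len(classes[p]) == 0 or child in classes[p]):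
--         p = next(iter(classes[p]))
--     return p
--
-- def searchChildren(classes, parent, child):
--     # Two phases: find the terminal class of the chain, then classify it.
--     t = _terminal(classes, parent, child)
--     return 0 if t == child or len(classes[t]) == 0 else 1
-- ===== Notes on version B (the rewrite author's own statement) =====
-- stated objective: simpler
-- what changed: Splits A's head recursion (with its meaningless '1 *' and dead trailing 'return 1') into two phases: an iterative loop that finds the terminal class of the first-parent chain, and a separate classifier that maps that terminal class to 0 or 1.
import Mathlib
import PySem

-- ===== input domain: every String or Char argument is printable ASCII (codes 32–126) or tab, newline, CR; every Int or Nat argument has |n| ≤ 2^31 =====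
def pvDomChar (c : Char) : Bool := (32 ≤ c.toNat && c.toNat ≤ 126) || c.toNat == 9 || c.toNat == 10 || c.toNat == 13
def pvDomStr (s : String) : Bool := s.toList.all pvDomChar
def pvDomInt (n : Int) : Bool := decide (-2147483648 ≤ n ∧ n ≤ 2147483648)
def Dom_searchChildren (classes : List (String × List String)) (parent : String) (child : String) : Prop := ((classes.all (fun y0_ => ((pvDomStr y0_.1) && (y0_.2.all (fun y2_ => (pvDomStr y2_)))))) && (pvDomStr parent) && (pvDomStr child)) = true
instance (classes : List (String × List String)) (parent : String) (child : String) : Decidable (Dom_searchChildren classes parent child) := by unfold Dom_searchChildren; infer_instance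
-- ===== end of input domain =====

-- B replaces A's head recursion (with its meaningless '1 *' and dead trailing 'return 1')
-- by two phases: find the terminal class of the first-parent chain, then classify it.
-- Return value only; on cyclic chains A raises RecursionError while B's loop does not
-- return — both outside Pre_.

-- classes[p]: dict lookup, none = KeyError (excluded by Pre_)
def pvLookup (classes : List (String × List String)) (p : String) : Option (List String) :=
  (PySem.Dict.mk classes).get? p

-- ===== PORT A =====
-- Python A is general recursion along the first-parent chain; ported with fuel
-- classes.length + 1 (enough for any chain that terminates at all: a longer chain
-- repeats a key, and there Python never returns — excluded by Pre_).
def searchChildrenAux (classes : List (String × List String)) (child : String) :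
    Nat → String → Int
  | 0, _ => 0       -- unreachable under Pre_ (Python recurses forever / RecursionError)
  | fuel + 1, parent =>
    if parent == child then 0
    else
      match pvLookup classes parent with
      | none => 0   -- KeyError, excluded by Pre_
      | some ps =>
        if ps.length == 0 then 0
        else if ps.contains child then 1
        else
          -- for grandparent in classes[parent]: return 1 * searchChildren(...)
          match ps with
          | [] => 1   -- trailing 'return 1' (loop body never entered)
          | grandparent :: _ => 1 * searchChildrenAux classes child fuel grandparent

def searchChildren (classes : List (String × List String)) (parent : String) (child : String) : Int :=
  searchChildrenAux classes child (classes.length + 1) parent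

-- ===== PORT B =====
-- Phase 1 (_terminal in Source B): the while-loop following first-parent links, with the
-- same fuel bound; at fuel 0 / missing key it stops at the current class (unreachable
-- under Pre_: Python loops forever resp. raises KeyError there).
def pvTerminalOf (classes : List (String × List String)) (child : String) :
    Nat → String → String
  | 0, p => p
  | fuel + 1, p =>
    if p == child then p
    else
      match pvLookup classes p with
      | none => p   -- KeyError, excluded by Pre_
      | some ps =>
        if ps.isEmpty || ps.contains child then p
        else
          match ps.head? with
          | none => p   -- unreachable: ps is nonempty
          | some g => pvTerminalOf classes child fuel g   -- p = next(iter(classes[p]))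

-- Phase 2: '0 if t == child or len(classes[t]) == 0 else 1'
def pvClassify (classes : List (String × List String)) (child : String) (t : String) : Int :=
  if t == child then 0
  else
    match pvLookup classes t with
    | none => 0   -- KeyError, excluded by Pre_
    | some ps => if ps.length == 0 then 0 else 1

def searchChildren_alt (classes : List (String × List String)) (parent : String) (child : String) : Int :=
  pvClassify classes child (pvTerminalOf classes child (classes.length + 1) parent)

-- ===== PRECONDITION & SPEC =====
-- Python A returns normally exactly when the first-parent chain from `parent` (each step:
-- the head of the looked-up parent list) reaches, within |classes| steps, a terminal class:
-- one equal to child, or with an empty parent list, or with child among its parents.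
-- Outside this, A raises (KeyError on a missing lookup, or RecursionError on a cycle).
def pvNext (classes : List (String × List String)) : Option String → Option String :=
  fun o => o.bind fun p => (pvLookup classes p).bind List.head?

def pvTerminal (classes : List (String × List String)) (child : String) (p : String) : Bool :=
  p == child ||
    (match pvLookup classes p with
     | some ps => ps.isEmpty || ps.contains child
     | none => false)

def Pre_searchChildren (classes : List (String × List String)) (parent : String) (child : String) : Prop :=
  ∃ i < classes.length + 1,
    ((pvNext classes)^[i] (some parent)).any (pvTerminal classes child) = true
instance (classes : List (String × List String)) (parent : String) (child : String) : Decidable (Pre_searchChildren classes parent child) := by unfold Pre_searchChildren; infer_instance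

def pvWitness_searchChildren : (List (String × List String)) × String × String :=
  ([("a", ["b"]), ("b", ["c"]), ("c", [])], "a", "c")

def Spec_searchChildren (classes : List (String × List String)) (parent : String) (child : String) (out : Int) : Prop := out = searchChildren_alt classes parent child
instance (classes : List (String × List String)) (parent : String) (child : String) (out : Int) : Decidable (Spec_searchChildren classes parent child out) := by unfold Spec_searchChildren; infer_instance

-- ===== CLAIM (what is proved, stated in full; the proofs are below) =====
def Claim_equal_searchChildren : Prop := ∀ (classes : List (String × List String)) (parent : String) (child : String), Dom_searchChildren classes parent child → Pre_searchChildren classes parent child → Spec_searchChildren classes parent child (searchChildren classes parent child)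

-- ===== LEMMAS AND PROOFS =====

-- As long as the chain reaches a terminal class within the fuel, A's recursion computes
-- exactly the classification of the terminal class that B's phase-1 loop finds.
theorem aux_eq_classify_term (classes : List (String × List String)) (child : String) :
    ∀ (fuel : Nat) (parent : String),
      (∃ i < fuel, ((pvNext classes)^[i] (some parent)).any (pvTerminal classes child) = true) →
      searchChildrenAux classes child fuel parent =
        pvClassify classes child (pvTerminalOf classes child fuel parent) := by
  intro fuel
  induction fuel with
  | zero => intro parent h; obtain ⟨i, hi, _⟩ := h; omega
  | succ n ih =>
    intro parent h
    simp only [searchChildrenAux, pvTerminalOf]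
    by_cases hpc : parent == child
    · simp [hpc, pvClassify]
    · simp only [hpc, if_false, Bool.false_eq_true]
      cases hlk : pvLookup classes parent with
      | none => simp [pvClassify, hpc, hlk]
      | some ps =>
        cases ps with
        | nil => simp [pvClassify, hpc, hlk]
        | cons g t =>
          have hpc' : ¬ parent = child := by simpa using hpc
          by_cases hc : child = g ∨ child ∈ t
          · simp [pvClassify, hc, hpc', hlk]
          · have hcc : (g :: t).contains child = false := by
              simpa [List.contains_cons] using hc
            simp only [hcc, List.length_cons, List.isEmpty_cons, Bool.false_or,
              Bool.false_eq_true, if_false, List.head?_cons]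
            have hterm : pvTerminal classes child parent = false := by
              simp only [pvTerminal, hlk, Bool.or_eq_false_iff, List.isEmpty_cons]
              exact ⟨by simpa using hpc', by simpa using hcc⟩
            obtain ⟨i, hi, hit⟩ := h
            cases i with
            | zero => simp [hterm] at hit
            | succ j =>
              have hnext : pvNext classes (some parent) = some g := by
                simp [pvNext, hlk]
              have hg : ((pvNext classes)^[j] (some g)).any (pvTerminal classes child) = true := by
                have := hit
                rwa [Function.iterate_succ_apply, hnext] at this
              rw [ih g ⟨j, by omega, hg⟩, one_mul]
              simp

-- ===== VERDICT (by name: the statement is the Claim_ definition above) =====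
theorem searchChildren_spec : Claim_equal_searchChildren := by
  intro classes parent child _ hpre
  unfold Spec_searchChildren searchChildren searchChildren_alt
  exact aux_eq_classify_term classes child _ parent hpre
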